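-- pv_equiv track=rewrite | github.com/Sh4rkzDev/AlgorithmsTheory | tp1/extras.py | asItComes
-- ===== SOURCE A (Python) =====
-- def asItComes(data):
--     total, longest, actual = 0, 0, 0
--     for t in data:
--         total += t[0]
--         actual = total + t[1]
--         if actual > longest:
--             longest = actual
--     return longest
-- ===== SOURCE B (Python) =====
-- def asItComes(data):
--     # Right-to-left fold: best = max over the suffix processed so far of
--     # (sum of first components from its start) + second component,
--     # using the recurrence best(t::ts) = max(a+b, a + best(ts))
--     # (addition distributes over max, so no running total is needed).
--     best = None
--     for a, b in reversed(data):
--         best = a + b if best is None else max(a + b, a + best)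
--     return max(0, best) if best is not None else 0
-- ===== Notes on version B (the rewrite author's own statement) =====
-- stated objective: alternative
-- what changed: Replaces A's left-to-right scan carrying a running total and an inline max by a right-to-left fold with the tropical recurrence best = max(a+b, a+best), which keeps no running prefix sum at all and floors at 0 only once at the end.
import Mathlib
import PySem

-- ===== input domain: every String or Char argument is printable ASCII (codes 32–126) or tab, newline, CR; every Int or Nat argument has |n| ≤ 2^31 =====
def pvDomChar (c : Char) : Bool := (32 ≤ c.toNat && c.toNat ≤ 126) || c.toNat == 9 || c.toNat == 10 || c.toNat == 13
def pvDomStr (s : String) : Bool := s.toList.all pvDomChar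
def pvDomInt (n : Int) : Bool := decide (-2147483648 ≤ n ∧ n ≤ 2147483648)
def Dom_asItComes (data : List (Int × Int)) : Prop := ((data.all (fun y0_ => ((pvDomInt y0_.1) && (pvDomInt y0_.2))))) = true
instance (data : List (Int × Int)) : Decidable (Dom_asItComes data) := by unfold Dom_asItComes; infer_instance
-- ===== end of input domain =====

-- B replaces A's left-to-right running-total scan by a right-to-left fold with the
-- recurrence best = max(a+b, a+best) (no running prefix sum); objective: alternative.

-- ===== PORT A =====
-- state: (total, longest); actual is recomputed each step
def asItComes (data : List (Int × Int)) : Int :=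
  (data.foldl (fun (st : Int × Int) t =>
      let total := st.1 + t.1
      let actual := total + t.2
      (total, if actual > st.2 then actual else st.2)) (0, 0)).2

-- ===== PORT B =====
-- 'for a, b in reversed(data)' with an Option accumulator = foldr over data
def asItComes_alt (data : List (Int × Int)) : Int :=
  let best := data.foldr (fun t (acc : Option Int) =>
      match acc with
      | none => some (t.1 + t.2)
      | some m => some (max (t.1 + t.2) (t.1 + m))) none
  match best with
  | none => 0
  | some m => max 0 m

-- ===== PRECONDITION & SPEC =====
def Spec_asItComes (data : List (Int × Int)) (out : Int) : Prop := out = asItComes_alt data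
instance (data : List (Int × Int)) (out : Int) : Decidable (Spec_asItComes data out) := by unfold Spec_asItComes; infer_instance

-- ===== CLAIM (what is proved, stated in full; the proofs are below) =====
def Claim_equal_asItComes : Prop := ∀ (data : List (Int × Int)), Dom_asItComes data → Spec_asItComes data (asItComes data)

-- ===== LEMMAS AND PROOFS =====

-- B's inner fold, named for the proofs
def pvBestF : List (Int × Int) → Option Int :=
  fun data => data.foldr (fun t (acc : Option Int) =>
      match acc with
      | none => some (t.1 + t.2)
      | some m => some (max (t.1 + t.2) (t.1 + m))) none

-- A's fold from an arbitrary state equals B's suffix best shifted by the running total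
theorem pvA_foldl (data : List (Int × Int)) : ∀ (total longest : Int),
    (data.foldl (fun (st : Int × Int) t =>
      (st.1 + t.1, if st.1 + t.1 + t.2 > st.2 then st.1 + t.1 + t.2 else st.2)) (total, longest)).2
    = match pvBestF data with
      | none => longest
      | some m => max longest (total + m) := by
  induction data with
  | nil => intro total longest; simp [pvBestF]
  | cons t ts ih =>
    intro total longest
    simp only [List.foldl, ih, pvBestF, List.foldr]
    obtain ⟨a, b⟩ := t
    cases h : pvBestF ts with
    | none => simp only [pvBestF] at h; simp only [h]; simp only [max_def]; split_ifs <;> linarith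
    | some m => simp only [pvBestF] at h; simp only [h]; simp only [max_def]; split_ifs <;> linarith

-- ===== VERDICT (by name: the statement is the Claim_ definition above) =====
theorem asItComes_spec : Claim_equal_asItComes := by
  intro data _
  unfold Spec_asItComes asItComes asItComes_alt
  rw [pvA_foldl]
  have hb : (data.foldr (fun t (acc : Option Int) =>
      match acc with
      | none => some (t.1 + t.2)
      | some m => some (max (t.1 + t.2) (t.1 + m))) none) = pvBestF data := rfl
  rw [hb]
  cases pvBestF data with
  | none => rfl
  | some m => simp
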